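-- pv_equiv track=rewrite | github.com/nexon33/voynich-grammar-analysis | scripts/phase3/test_expanded_vowel_mappings.py | generate_variants_multi_vowel
-- ===== SOURCE A (Python) =====
-- from itertools import product
--
-- def generate_variants_multi_vowel(word, max_variants=64):
--     """
--     Generate variants with multiple vowel substitutions:
--     - e ↔ o (existing)
--     - a ↔ e (new)
--     - i ↔ y (new)
--     - u ↔ o (optional)
--     """
--     # Find positions for each vowel pair
--     substitutions = {
--         "e": ["e", "o"],  # e can become o
--         "o": ["o", "e"],  # o can become e
--         "a": ["a", "e"],  # a can become e
--         "i": ["i", "y"],  # i can become y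
--         "y": ["y", "i"],  # y can become i
--         "u": ["u", "o"],  # u can become o (rare)
--     }
--
--     # Build list of (position, possible_chars)
--     positions = []
--     for i, char in enumerate(word.lower()):
--         if char in substitutions:
--             positions.append((i, substitutions[char]))
--         else:
--             positions.append((i, [char]))
--
--     # Limit combinatorial explosion
--     total_combinations = 1
--     for pos, chars in positions:
--         total_combinations *= len(chars)
--
--     if total_combinations > max_variants:
--         # Just try e↔o only
--         return generate_variants_eo_only(word, max_variants)
--
--     # Generate all combinations
--     variants = set()
--     for combo in product(*[chars for _, chars in positions]):
--         variant = "".join(combo)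
--         variants.add(variant)
--         if len(variants) >= max_variants:
--             break
--
--     return list(variants)
--
-- def generate_variants_eo_only(word, max_variants=32):
--     """Generate variants with e↔o only (existing method)."""
--     eo_positions = [(i, c) for i, c in enumerate(word.lower()) if c in ["e", "o"]]
--
--     if len(eo_positions) > 5:
--         return [
--             word.lower(),
--             word.lower().replace("o", "e"),
--             word.lower().replace("e", "o"),
--         ]
--
--     variants = set()
--     for combination in product(["e", "o"], repeat=len(eo_positions)):
--         variant = list(word.lower())
--         for (pos, _), new_char in zip(eo_positions, combination):
--             variant[pos] = new_char
--         variants.add("".join(variant))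
--         if len(variants) >= max_variants:
--             break
--
--     return list(variants)
-- ===== SOURCE B (Python) =====
-- def _decode(w, opts, mask):
--     """Build the variant whose substitution choices are the bits of mask
--     (least-significant bit drives the rightmost substitutable character)."""
--     out = []
--     for c in reversed(w):
--         if c in opts:
--             mask, bit = divmod(mask, 2)
--             out.append(opts[c][bit])
--         else:
--             out.append(c)
--     out.reverse()
--     return "".join(out)
--
--
-- def generate_variants_multi_vowel(word, max_variants=64):
--     w = word.lower()
--     multi = {"e": ("e", "o"), "o": ("o", "e"), "a": ("a", "e"),
--              "i": ("i", "y"), "y": ("y", "i"), "u": ("u", "o")}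
--     m = sum(c in multi for c in w)
--     if 2 ** m <= max_variants:
--         return [_decode(w, multi, mask) for mask in range(2 ** m)]
--     # too many combinations: restrict to e/o substitutions
--     eo = {"e": ("e", "o"), "o": ("e", "o")}
--     k = sum(c in eo for c in w)
--     if k > 5:
--         return [w, w.replace("o", "e"), w.replace("e", "o")]
--     out = []
--     for mask in range(2 ** k):
--         out.append(_decode(w, eo, mask))
--         if len(out) >= max_variants:
--             break
--     return out
-- ===== Notes on version B (the rewrite author's own statement) =====
-- stated objective: alternative
-- what changed: B replaces itertools.product over per-position alternative lists plus set-based dedup by ranked-index enumeration: it counts the substitutable characters, iterates the integers 0..2**m-1 and decodes each integer's bits into one variant in a single right-to-left divmod pass, so the positions list, the product iterator and the dedup set all disappear (the variants are pairwise distinct by construction).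
import Mathlib
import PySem

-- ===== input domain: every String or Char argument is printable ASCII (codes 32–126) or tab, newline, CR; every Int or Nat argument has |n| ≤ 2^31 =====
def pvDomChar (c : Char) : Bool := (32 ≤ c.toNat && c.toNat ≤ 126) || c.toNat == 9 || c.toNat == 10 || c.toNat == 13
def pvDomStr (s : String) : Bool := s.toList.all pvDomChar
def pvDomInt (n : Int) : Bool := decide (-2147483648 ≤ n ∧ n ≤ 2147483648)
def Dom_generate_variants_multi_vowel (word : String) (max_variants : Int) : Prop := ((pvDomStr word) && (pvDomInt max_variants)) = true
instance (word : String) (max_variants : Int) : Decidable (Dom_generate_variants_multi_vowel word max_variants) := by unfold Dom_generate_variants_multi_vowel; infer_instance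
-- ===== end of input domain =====

-- B replaces A's itertools.product over per-position alternative lists and its dedup set by
-- ranked-index enumeration: it counts the substitutable characters and decodes the bits of each
-- integer 0..2^m-1 into one variant in a single right-to-left divmod pass (objective: alternative).
-- Both Pythons return the same SET of strings; Python A's list(set(...)) hash order is not
-- modelled: both ports return the variants in generation order, and the claim is list equality
-- of the ports (Python outputs are compared as sets by the differential tester).

-- ===== PORT A =====
-- the substitutions dict (its values are lists of 1-char strings; modelled as lists of Chars,
-- exact because "".join then concatenates exactly those single characters)
def pvSubsA : PySem.Dict Char (List Char) :=
  ((((((PySem.Dict.empty).insert 'e' ['e','o']).insert 'o' ['o','e']).insert 'a' ['a','e']).insert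
      'i' ['i','y']).insert 'y' ['y','i']).insert 'u' ['u','o']

-- itertools.product(*lists): hand port, exact (tuples in Python's iteration order, last slot fastest)
def pvProduct {α : Type} (ls : List (List α)) : List (List α) :=
  ls.foldr (fun cs acc => cs.flatMap (fun c => acc.map (c :: ·))) [[]]

-- the loop 'for combo in <combos>: variant = <build combo>; variants.add(variant);
--           if len(variants) >= max_variants: break' (the shared shape of A's two loops)
def pvAddLoop (max_variants : Int) (build : List Char → String) :
    List (List Char) → PySem.Set String → PySem.Set String
  | [], s => s
  | combo :: rest, s =>
      let s' := PySem.Set.add s (build combo)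
      if max_variants ≤ PySem.Set.len s' then s' else pvAddLoop max_variants build rest s'

def generate_variants_eo_only (word : String) (max_variants : Int) : List String :=
  let lw := PySem.Str.lower word
  let eo_positions := (PySem.List.enumerate lw.toList).filter (fun p => ['e','o'].contains p.2)
  if 5 < eo_positions.length then
    [lw, PySem.Str.replace lw "o" "e", PySem.Str.replace lw "e" "o"]
  else
    let combos := pvProduct (List.replicate eo_positions.length ['e','o'])
    -- variant = list(word.lower()); variant[pos] = new_char; "".join(variant)
    pvAddLoop max_variants
      (fun combo => String.ofList ((eo_positions.zip combo).foldl
        (fun v pc => PySem.List.pySetD v pc.1.1 pc.2) lw.toList))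
      combos PySem.Set.empty

def generate_variants_multi_vowel (word : String) (max_variants : Int) : List String :=
  let positions := (PySem.List.enumerate (PySem.Str.lower word).toList).foldl
      (fun acc p => acc ++ [(p.1, if pvSubsA.contains p.2 then pvSubsA.getD p.2 [p.2] else [p.2])])
      []
  let total := positions.foldl (fun t pc => t * (pc.2.length : Int)) 1
  if max_variants < total then
    generate_variants_eo_only word max_variants
  else
    let combos := pvProduct (positions.map (·.2))
    -- variant = "".join(combo): the combo's 1-char pieces concatenated
    pvAddLoop max_variants (fun combo => String.ofList combo) combos PySem.Set.empty

-- ===== PORT B =====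
-- B's two option dicts: char -> (choice for bit 0, choice for bit 1)
def pvMulti : PySem.Dict Char (Char × Char) :=
  ((((((PySem.Dict.empty).insert 'e' ('e','o')).insert 'o' ('o','e')).insert 'a' ('a','e')).insert
      'i' ('i','y')).insert 'y' ('y','i')).insert 'u' ('u','o')

def pvEo : PySem.Dict Char (Char × Char) :=
  ((PySem.Dict.empty).insert 'e' ('e','o')).insert 'o' ('e','o')

-- the body of _decode's 'for c in reversed(w)' loop: 'if c in opts: mask, bit = divmod(mask, 2);
-- out.append(opts[c][bit]) else: out.append(c)' ('opts[c][bit]' with bit in {0,1} is the pair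
-- projection selected by the bit)
def pvDecodeStep (opts : PySem.Dict Char (Char × Char)) (st : List Char × Int) (c : Char) :
    List Char × Int :=
  if opts.contains c then
    (st.1 ++ [if PySem.Int.mod st.2 2 = 0 then (opts.getD c (c, c)).1
              else (opts.getD c (c, c)).2],
     PySem.Int.floordiv st.2 2)
  else (st.1 ++ [c], st.2)

-- _decode(w, opts, mask): right-to-left pass, then out.reverse(); "".join(out)
def pvDecode (opts : PySem.Dict Char (Char × Char)) (w : List Char) (mask : Int) : String :=
  String.ofList ((w.reverse.foldl (pvDecodeStep opts) ([], mask)).1.reverse)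

-- the fallback loop 'out.append(_decode(w, eo, mask)); if len(out) >= max_variants: break'
def pvCollect (opts : PySem.Dict Char (Char × Char)) (w : List Char) (max_variants : Int) :
    List Int → List String → List String
  | [], out => out
  | mask :: rest, out =>
      let out' := out ++ [pvDecode opts w mask]
      if max_variants ≤ (out'.length : Int) then out' else pvCollect opts w max_variants rest out'

def generate_variants_multi_vowel_alt (word : String) (max_variants : Int) : List String :=
  let w := (PySem.Str.lower word).toList
  let m := w.countP (fun c => pvMulti.contains c)          -- sum(c in multi for c in w)
  if ((2 ^ m : Nat) : Int) ≤ max_variants then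
    (PySem.List.pyRange 0 ((2 ^ m : Nat) : Int) 1).map (fun mask => pvDecode pvMulti w mask)
  else
    let k := w.countP (fun c => pvEo.contains c)
    if 5 < k then
      let lw := PySem.Str.lower word
      [lw, PySem.Str.replace lw "o" "e", PySem.Str.replace lw "e" "o"]
    else
      pvCollect pvEo w max_variants (PySem.List.pyRange 0 ((2 ^ k : Nat) : Int) 1) []

-- ===== PRECONDITION & SPEC =====
def Spec_generate_variants_multi_vowel (word : String) (max_variants : Int) (out : List String) : Prop := out = generate_variants_multi_vowel_alt word max_variants
instance (word : String) (max_variants : Int) (out : List String) : Decidable (Spec_generate_variants_multi_vowel word max_variants out) := by unfold Spec_generate_variants_multi_vowel; infer_instance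

-- ===== CLAIM (what is proved, stated in full; the proofs are below) =====
def Claim_equal_generate_variants_multi_vowel : Prop := ∀ (word : String) (max_variants : Int), Dom_generate_variants_multi_vowel word max_variants → Spec_generate_variants_multi_vowel word max_variants (generate_variants_multi_vowel word max_variants)

-- ===== LEMMAS AND PROOFS =====

-- proof-only description of each character's alternatives
def pvSubsB (c : Char) : List Char :=
  if c = 'e' then ['e','o'] else if c = 'o' then ['o','e'] else if c = 'a' then ['a','e']
  else if c = 'i' then ['i','y'] else if c = 'y' then ['y','i'] else if c = 'u' then ['u','o']
  else [c]

theorem pvProduct_cons {α : Type} (cs : List α) (ls : List (List α)) :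
    pvProduct (cs :: ls) = cs.flatMap (fun c => (pvProduct ls).map (c :: ·)) := rfl

theorem length_pvProduct (ls : List (List Char)) :
    (pvProduct ls).length = (ls.map List.length).prod := by
  induction ls with
  | nil => simp [pvProduct]
  | cons cs rest ih =>
      simp [pvProduct, List.length_flatMap] at *
      simp [ih]

theorem nodup_pvProduct (ls : List (List Char)) (h : ∀ cs ∈ ls, cs.Nodup) :
    (pvProduct ls).Nodup := by
  induction ls with
  | nil => simp [pvProduct]
  | cons cs rest ih =>
      have hr : (pvProduct rest).Nodup := ih (fun c hc => h c (List.mem_cons_of_mem _ hc))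
      have hc : cs.Nodup := h cs List.mem_cons_self
      rw [pvProduct_cons, List.nodup_flatMap]
      refine ⟨fun c _ => hr.map (fun a b hab => by simpa using hab), ?_⟩
      refine hc.imp ?_
      intro a b hab y hya hyb
      simp only [List.mem_map] at hya hyb
      obtain ⟨u, _, rfl⟩ := hya
      obtain ⟨v, _, h2⟩ := hyb
      exact hab (by injection h2.symm)

-- the add-and-break loop on a duplicate-free variant list returns a prefix of it
theorem pvAddLoop_take (max_variants : Int) (build : List Char → String)
    (l : List (List Char)) (s : List String)
    (hn : (l.map build).Nodup) (hd : ∀ x ∈ l.map build, x ∉ s) :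
    pvAddLoop max_variants build l s
      = s ++ (l.map build).take
          (if max_variants - s.length < 1 then 1 else (max_variants - s.length).toNat) := by
  induction l generalizing s with
  | nil => simp [pvAddLoop]
  | cons combo rest ih =>
      have hv : build combo ∉ s := hd _ (by simp)
      have hadd : PySem.Set.add s (build combo) = s ++ [build combo] := by
        simp [PySem.Set.add, hv]
      rw [pvAddLoop]
      simp only [hadd, PySem.Set.len]
      by_cases hm : max_variants ≤ ((s ++ [build combo]).length : Int)
      · rw [if_pos hm]
        have ht : (if max_variants - (s.length:Int) < 1 then 1 else (max_variants - (s.length:Int)).toNat) = 1 := by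
          simp only [List.length_append, List.length_cons, List.length_nil] at hm
          split_ifs <;> omega
        rw [ht]
        simp
      · rw [if_neg hm]
        rw [ih (s ++ [build combo])
            (by simpa using hn.of_cons)
            (by intro x hx; simp only [List.mem_append, List.mem_singleton]
                push Not
                refine ⟨hd x (List.mem_cons_of_mem _ hx), ?_⟩
                intro h; rw [h] at hx
                exact (List.nodup_cons.mp (by simpa using hn)).1 hx)]
        simp only [List.map_cons, List.append_assoc, List.singleton_append]
        congr 1
        have h1 : ¬ max_variants - (s.length : Int) < 1 := by simp at hm; omega
        rw [if_neg h1]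
        have h2 : (if max_variants - ((s ++ [build combo]).length : Int) < 1 then 1
            else (max_variants - ((s ++ [build combo]).length : Int)).toNat)
            = (max_variants - (s.length:Int)).toNat - 1 := by
          simp only [List.length_append, List.length_cons, List.length_nil] at hm ⊢
          split_ifs <;> [skip; skip] <;> push_cast at * <;> omega
        rw [h2]
        have h3 : (max_variants - (s.length:Int)).toNat = ((max_variants - (s.length:Int)).toNat - 1) + 1 := by
          simp at hm; omega
        rw [h3, List.take_succ_cons]
        simp

-- the collect-and-break loop is the same prefix, with no set involved
theorem pvCollect_take (opts : PySem.Dict Char (Char × Char)) (w : List Char)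
    (max_variants : Int) (l : List Int) (out : List String) :
    pvCollect opts w max_variants l out
      = out ++ (l.map (pvDecode opts w)).take
          (if max_variants - out.length < 1 then 1 else (max_variants - out.length).toNat) := by
  induction l generalizing out with
  | nil => simp [pvCollect]
  | cons mask rest ih =>
      rw [pvCollect]
      by_cases hm : max_variants ≤ ((out ++ [pvDecode opts w mask]).length : Int)
      · rw [if_pos hm]
        have ht : (if max_variants - (out.length:Int) < 1 then 1 else (max_variants - (out.length:Int)).toNat) = 1 := by
          simp only [List.length_append, List.length_cons, List.length_nil] at hm
          split_ifs <;> omega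
        rw [ht]
        simp
      · rw [if_neg hm, ih]
        simp only [List.map_cons, List.append_assoc, List.singleton_append]
        congr 1
        have h1 : ¬ max_variants - (out.length : Int) < 1 := by simp at hm; omega
        rw [if_neg h1]
        have h2 : (if max_variants - ((out ++ [pvDecode opts w mask]).length : Int) < 1 then 1
            else (max_variants - ((out ++ [pvDecode opts w mask]).length : Int)).toNat)
            = (max_variants - (out.length:Int)).toNat - 1 := by
          simp only [List.length_append, List.length_cons, List.length_nil] at hm ⊢
          split_ifs <;> [skip; skip] <;> push_cast at * <;> omega
        rw [h2]
        have h3 : (max_variants - (out.length:Int)).toNat = ((max_variants - (out.length:Int)).toNat - 1) + 1 := by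
          simp at hm; omega
        rw [h3, List.take_succ_cons]
        simp

-- the e/o positions of A's filtered-enumerate comprehension, as a structural recursion
def pvEposFrom (i : Int) : List Char → List (Int × Char)
  | [] => []
  | c :: r => if ['e','o'].contains c then (i, c) :: pvEposFrom (i+1) r else pvEposFrom (i+1) r

theorem filter_enumerate_eq_pvEposFrom (w : List Char) (s : Int) :
    (PySem.List.enumerate w s).filter (fun p => ['e','o'].contains p.2) = pvEposFrom s w := by
  induction w generalizing s with
  | nil => simp [pvEposFrom, PySem.List.enumerate_nil]
  | cons c r ih =>
      rw [PySem.List.enumerate_cons, pvEposFrom, List.filter_cons, ih]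

theorem length_pvEposFrom (w : List Char) (i : Int) :
    (pvEposFrom i w).length = w.countP (fun c => ['e','o'].contains c) := by
  induction w generalizing i with
  | nil => simp [pvEposFrom]
  | cons c r ih =>
      rw [pvEposFrom, List.countP_cons]
      split <;> simp_all

theorem set_append_cons (pre suf : List Char) (a b : Char) :
    (pre ++ a :: suf).set pre.length b = pre ++ b :: suf := by
  induction pre with
  | nil => simp
  | cons x r ih => simp [ih]

theorem build_head (pre r : List Char) (c d : Char) (epos : List (Int × Char)) (combo : List Char) :
    (((((pre.length : Int), c) :: epos).zip (d :: combo)).foldl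
        (fun v pc => PySem.List.pySetD v pc.1.1 pc.2) (pre ++ c :: r))
      = ((epos.zip combo).foldl (fun v pc => PySem.List.pySetD v pc.1.1 pc.2) (pre ++ d :: r)) := by
  rw [List.zip_cons_cons, List.foldl_cons]
  congr 1
  rw [show ((pre.length : Int), c).1 = ((pre.length : Nat) : Int) from rfl]
  rw [PySem.List.pySetD_natCast, set_append_cons]

-- substituting every e/o combination at the e/o positions is the per-character expansion
theorem eo_build_eq (w pre : List Char) :
    (pvProduct (List.replicate (w.countP (fun c => ['e','o'].contains c)) ['e','o'])).map
        (fun combo => ((pvEposFrom (pre.length : Int) w).zip combo).foldl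
          (fun v pc => PySem.List.pySetD v pc.1.1 pc.2) (pre ++ w))
      = (pvProduct (w.map (fun c => if ['e','o'].contains c then ['e','o'] else [c]))).map
          (pre ++ ·) := by
  induction w generalizing pre with
  | nil => simp [pvProduct, pvEposFrom]
  | cons c r ih =>
      have hcast : ∀ d : Char, ((pre.length : Int) + 1) = (((pre ++ [d]).length : Nat) : Int) := by
        intro d; simp
      by_cases h : ['e','o'].contains c
      · rw [List.countP_cons_of_pos (p := fun c => ['e','o'].contains c) (by simpa using h),
          List.map_cons, if_pos h, List.replicate_succ, pvProduct_cons, pvProduct_cons]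
        rw [pvEposFrom, if_pos h]
        simp only [List.flatMap_cons, List.flatMap_nil, List.append_nil, List.map_append,
          List.map_map, Function.comp_def]
        congr 1
        · rw [List.map_congr_left (fun combo _ => build_head pre r c 'e' _ combo)]
          rw [show pre ++ 'e' :: r = (pre ++ ['e']) ++ r by simp, hcast 'e', ih (pre ++ ['e'])]
          simp
        · rw [List.map_congr_left (fun combo _ => build_head pre r c 'o' _ combo)]
          rw [show pre ++ 'o' :: r = (pre ++ ['o']) ++ r by simp, hcast 'o', ih (pre ++ ['o'])]
          simp
      · rw [List.countP_cons_of_neg (p := fun c => ['e','o'].contains c) (by simpa using h),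
          List.map_cons, if_neg h, pvProduct_cons]
        rw [pvEposFrom, if_neg h]
        simp only [List.flatMap_cons, List.flatMap_nil, List.append_nil, List.map_map,
          Function.comp_def]
        rw [show pre ++ c :: r = (pre ++ [c]) ++ r by simp, hcast c, ih (pre ++ [c])]
        simp

-- A's dict lookup agrees with the per-character alternatives
theorem substA_eq_pvSubsB (c : Char) :
    (if pvSubsA.contains c then pvSubsA.getD c [c] else [c]) = pvSubsB c := by
  by_cases h1 : c = 'e'; · subst h1; decide
  by_cases h2 : c = 'o'; · subst h2; decide
  by_cases h3 : c = 'a'; · subst h3; decide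
  by_cases h4 : c = 'i'; · subst h4; decide
  by_cases h5 : c = 'y'; · subst h5; decide
  by_cases h6 : c = 'u'; · subst h6; decide
  have hco : pvSubsA.contains c = false := by
    simp [pvSubsA, PySem.Dict.contains, PySem.Dict.insert, PySem.Dict.empty]
    exact ⟨fun h => h1 h.symm, fun h => h2 h.symm, fun h => h3 h.symm, fun h => h4 h.symm,
      fun h => h5 h.symm, fun h => h6 h.symm⟩
  rw [hco]
  simp [pvSubsB, h1, h2, h3, h4, h5, h6]

-- B's multi dict yields the same alternatives
theorem multi_group_eq (c : Char) :
    (if pvMulti.contains c then [(pvMulti.getD c (c,c)).1, (pvMulti.getD c (c,c)).2] else [c])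
      = pvSubsB c := by
  by_cases h1 : c = 'e'; · subst h1; decide
  by_cases h2 : c = 'o'; · subst h2; decide
  by_cases h3 : c = 'a'; · subst h3; decide
  by_cases h4 : c = 'i'; · subst h4; decide
  by_cases h5 : c = 'y'; · subst h5; decide
  by_cases h6 : c = 'u'; · subst h6; decide
  have hco : pvMulti.contains c = false := by
    simp [pvMulti, PySem.Dict.contains, PySem.Dict.insert, PySem.Dict.empty]
    exact ⟨fun h => h1 h.symm, fun h => h2 h.symm, fun h => h3 h.symm, fun h => h4 h.symm,
      fun h => h5 h.symm, fun h => h6 h.symm⟩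
  rw [hco]
  simp [pvSubsB, h1, h2, h3, h4, h5, h6]

theorem multi_contains_eq (c : Char) :
    pvMulti.contains c = ['e','o','a','i','y','u'].contains c := by
  have := multi_group_eq c
  by_cases h : pvMulti.contains c
  · rw [if_pos h] at this
    have hv : ['e','o','a','i','y','u'].contains c = true := by
      by_contra hn
      simp only [List.contains_eq_mem, List.mem_cons, List.not_mem_nil, or_false,
        decide_eq_true_eq] at hn
      push Not at hn
      obtain ⟨n1, n2, n3, n4, n5, n6⟩ := hn
      simp [pvSubsB, n1, n2, n3, n4, n5, n6] at this
    rw [h, hv]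
  · rw [if_neg h] at this
    simp only [Bool.not_eq_true] at h
    have hv : ['e','o','a','i','y','u'].contains c = false := by
      by_contra hn
      simp only [Bool.not_eq_false, List.contains_eq_mem, List.mem_cons, List.not_mem_nil,
        or_false, decide_eq_true_eq] at hn
      rcases hn with rfl | rfl | rfl | rfl | rfl | rfl <;> simp [pvSubsB] at this
    rw [h, hv]

theorem eo_contains_eq (c : Char) : pvEo.contains c = ['e','o'].contains c := by
  by_cases h1 : c = 'e'; · subst h1; decide
  by_cases h2 : c = 'o'; · subst h2; decide
  have hco : pvEo.contains c = false := by
    simp [pvEo, PySem.Dict.contains, PySem.Dict.insert, PySem.Dict.empty]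
    exact ⟨fun h => h1 h.symm, fun h => h2 h.symm⟩
  rw [hco]
  simp [h1, h2]

theorem eo_group_eq (c : Char) :
    (if pvEo.contains c then [(pvEo.getD c (c,c)).1, (pvEo.getD c (c,c)).2] else [c])
      = (if ['e','o'].contains c then ['e','o'] else [c]) := by
  by_cases h1 : c = 'e'; · subst h1; decide
  by_cases h2 : c = 'o'; · subst h2; decide
  rw [eo_contains_eq]
  simp [h1, h2]

theorem pvSubsB_nodup (c : Char) : (pvSubsB c).Nodup := by
  unfold pvSubsB; split_ifs <;> simp_all

theorem pvSubsB_length (c : Char) :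
    (pvSubsB c).length = if ['e','o','a','i','y','u'].contains c then 2 else 1 := by
  unfold pvSubsB
  by_cases h1 : c = 'e' <;> by_cases h2 : c = 'o' <;> by_cases h3 : c = 'a' <;>
    by_cases h4 : c = 'i' <;> by_cases h5 : c = 'y' <;> by_cases h6 : c = 'u' <;>
    simp_all

-- the 'total_combinations' product is 2 ^ (number of substitutable characters)
theorem prod_len_eq_pow (w : List Char) :
    (w.map (fun c => (pvSubsB c).length)).prod
      = 2 ^ (w.countP (fun c => ['e','o','a','i','y','u'].contains c)) := by
  induction w with
  | nil => simp
  | cons c r ih =>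
      rw [List.map_cons, List.prod_cons, pvSubsB_length c, ih, List.countP_cons]
      by_cases h : ['e','o','a','i','y','u'].contains c
      · rw [if_pos h, if_pos (by simpa using h), pow_succ, Nat.mul_comm]
      · rw [if_neg h, if_neg (by simpa using h)]; simp

theorem foldl_mul_len (l : List (Int × List Char)) (a : Int) :
    l.foldl (fun t pc => t * (pc.2.length : Int)) a
      = a * (((l.map (fun pc => pc.2.length)).prod : Nat) : Int) := by
  induction l generalizing a with
  | nil => simp
  | cons p r ih =>
      rw [List.foldl_cons, ih, List.map_cons, List.prod_cons]
      push_cast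
      ring

-- ----- the decode machinery: pvDecode's loop as a Nat-mask structural recursion -----

-- left-to-right over a (reversed) character list, consuming low bits first
def pvGN (d : PySem.Dict Char (Char × Char)) : List Char → Nat → List Char
  | [], _ => []
  | c :: r, i =>
      if d.contains c then
        (if i % 2 = 0 then (d.getD c (c,c)).1 else (d.getD c (c,c)).2) :: pvGN d r (i / 2)
      else c :: pvGN d r i

theorem decode_fold_eq (d : PySem.Dict Char (Char × Char)) (l : List Char) (acc : List Char)
    (i : Nat) :
    l.foldl (pvDecodeStep d) (acc, (i : Int))
      = (acc ++ pvGN d l i, ((i / 2 ^ (l.countP (fun c => d.contains c)) : Nat) : Int)) := by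
  induction l generalizing acc i with
  | nil => simp [pvGN]
  | cons c r ih =>
      rw [List.foldl_cons]
      by_cases h : d.contains c
      · have hstep : pvDecodeStep d (acc, (i : Int)) c
            = (acc ++ [if i % 2 = 0 then (d.getD c (c,c)).1 else (d.getD c (c,c)).2],
               ((i / 2 : Nat) : Int)) := by
          simp only [pvDecodeStep, h, if_true]
          congr 1
          · congr 1
            have hm : PySem.Int.mod ((i : Nat) : Int) 2 = ((i % 2 : Nat) : Int) := by simp
            rw [hm]
            by_cases hp : i % 2 = 0
            · rw [if_pos (by exact_mod_cast hp : ((i % 2 : Nat) : Int) = 0), if_pos hp]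
            · rw [if_neg (by exact_mod_cast hp : ¬ ((i % 2 : Nat) : Int) = 0), if_neg hp]
          · simp
        rw [hstep, ih]
        rw [pvGN, if_pos h, List.countP_cons_of_pos (by simpa using h), Prod.mk.injEq]
        refine ⟨by simp, ?_⟩
        rw [Nat.div_div_eq_div_mul]
        congr 2
        rw [pow_succ, Nat.mul_comm]
      · have hstep : pvDecodeStep d (acc, (i : Int)) c = (acc ++ [c], (i : Int)) := by
          simp [pvDecodeStep, h]
        rw [hstep, ih, pvGN, if_neg h, List.countP_cons_of_neg (by simpa using h)]
        simp

theorem pvDecode_natCast (d : PySem.Dict Char (Char × Char)) (w : List Char) (i : Nat) :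
    pvDecode d w (i : Int) = String.ofList (pvGN d w.reverse i).reverse := by
  rw [pvDecode, decode_fold_eq]
  simp

theorem pvGN_append (d : PySem.Dict Char (Char × Char)) (l1 l2 : List Char) (i : Nat) :
    pvGN d (l1 ++ l2) i
      = pvGN d l1 i ++ pvGN d l2 (i / 2 ^ (l1.countP (fun c => d.contains c))) := by
  induction l1 generalizing i with
  | nil => simp [pvGN]
  | cons c r ih =>
      by_cases h : d.contains c
      · rw [List.cons_append, pvGN, if_pos h, pvGN, if_pos h, ih,
          List.countP_cons_of_pos (by simpa using h)]
        rw [Nat.div_div_eq_div_mul]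
        congr 2
        rw [pow_succ, Nat.mul_comm]
      · rw [List.cons_append, pvGN, if_neg h, pvGN, if_neg h, ih,
          List.countP_cons_of_neg (by simpa using h)]
        simp

-- the decoded characters depend only on the low (countP) bits of the mask
theorem pvGN_add_pow (d : PySem.Dict Char (Char × Char)) (l : List Char) (i t : Nat) :
    pvGN d l (i + 2 ^ (l.countP (fun c => d.contains c)) * t) = pvGN d l i := by
  induction l generalizing i t with
  | nil => simp [pvGN]
  | cons c r ih =>
      by_cases h : d.contains c
      · rw [pvGN, pvGN, if_pos h, if_pos h, List.countP_cons_of_pos (by simpa using h)]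
        have hP : 2 ^ (r.countP (fun c => d.contains c) + 1)
            = 2 ^ (r.countP (fun c => d.contains c)) * 2 := pow_succ 2 _
        rw [hP]
        have hflip : 2 ^ (r.countP (fun c => d.contains c)) * 2 * t
            = 2 * (2 ^ (r.countP (fun c => d.contains c)) * t) := by ring
        have hmod : (i + 2 ^ (r.countP (fun c => d.contains c)) * 2 * t) % 2 = i % 2 := by
          rw [hflip]; omega
        have hdiv : (i + 2 ^ (r.countP (fun c => d.contains c)) * 2 * t) / 2
            = i / 2 + 2 ^ (r.countP (fun c => d.contains c)) * t := by
          rw [hflip]; omega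
        rw [hmod, hdiv, ih]
      · rw [pvGN, pvGN, if_neg h, if_neg h, List.countP_cons_of_neg (by simpa using h)]
        rw [ih]

-- the decoded word, as a function of the word read left-to-right (high bits first)
theorem pvH_cons (d : PySem.Dict Char (Char × Char)) (c : Char) (r : List Char) (i : Nat) :
    (pvGN d (c :: r).reverse i).reverse
      = (if d.contains c then
          [if (i / 2 ^ (r.countP (fun c => d.contains c))) % 2 = 0 then (d.getD c (c,c)).1
           else (d.getD c (c,c)).2]
         else [c]) ++ (pvGN d r.reverse i).reverse := by
  rw [List.reverse_cons, pvGN_append]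
  have hcr : r.reverse.countP (fun c => d.contains c) = r.countP (fun c => d.contains c) := by
    simp
  rw [hcr]
  by_cases h : d.contains c
  · rw [pvGN, if_pos h, pvGN, if_pos h]
    simp
  · rw [pvGN, if_neg h, pvGN, if_neg h]
    simp

-- central lemma: decoding the masks 0..2^m-1 in order is exactly itertools.product in order
theorem decode_range_eq_product (d : PySem.Dict Char (Char × Char)) (w : List Char) :
    (List.range (2 ^ (w.countP (fun c => d.contains c)))).map
        (fun i => (pvGN d w.reverse i).reverse)
      = pvProduct (w.map (fun c =>
          if d.contains c then [(d.getD c (c,c)).1, (d.getD c (c,c)).2] else [c])) := by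
  induction w with
  | nil => simp [pvGN, pvProduct]
  | cons c r ih =>
      by_cases h : d.contains c
      · rw [List.countP_cons_of_pos (by simpa using h), List.map_cons, if_pos h, pvProduct_cons]
        have hsplit : (2 : Nat) ^ (r.countP (fun c => d.contains c) + 1)
            = 2 ^ (r.countP (fun c => d.contains c)) + 2 ^ (r.countP (fun c => d.contains c)) := by
          rw [pow_succ]; omega
        rw [hsplit, List.range_add, List.map_append, List.map_map]
        simp only [List.flatMap_cons, List.flatMap_nil, List.append_nil]
        congr 1
        · rw [← ih, List.map_map]
          apply List.map_congr_left
          intro i hi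
          simp only [List.mem_range] at hi
          simp only [Function.comp_def]
          rw [pvH_cons, if_pos h, Nat.div_eq_of_lt hi]
          simp
        · rw [← ih, List.map_map]
          apply List.map_congr_left
          intro i hi
          simp only [List.mem_range] at hi
          simp only [Function.comp_def]
          rw [pvH_cons, if_pos h]
          have hdiv : (2 ^ (r.countP (fun c => d.contains c)) + i)
              / 2 ^ (r.countP (fun c => d.contains c)) = 1 := by
            rw [Nat.add_comm, Nat.add_div_right i (Nat.two_pow_pos _), Nat.div_eq_of_lt hi]
          rw [hdiv]
          have heq : (2 : Nat) ^ (r.countP (fun c => d.contains c)) + i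
              = i + 2 ^ (r.countP (fun c => d.contains c)) * 1 := by omega
          have hcr2 : r.countP (fun c => d.contains c)
              = r.reverse.countP (fun c => d.contains c) := by simp
          rw [heq, hcr2, pvGN_add_pow]
          simp
      · rw [List.countP_cons_of_neg (by simpa using h), List.map_cons, if_neg h, pvProduct_cons]
        rw [← ih]
        simp only [List.flatMap_cons, List.flatMap_nil, List.append_nil, List.map_map]
        apply List.map_congr_left
        intro i _
        simp only [Function.comp_def]
        rw [pvH_cons, if_neg h]
        simp

-- B's mask loop produces the product list, as strings, in product order
theorem decode_map_range (d : PySem.Dict Char (Char × Char)) (w : List Char) :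
    (PySem.List.pyRange 0 ((2 ^ (w.countP (fun c => d.contains c)) : Nat) : Int) 1).map
        (fun mask => pvDecode d w mask)
      = (pvProduct (w.map (fun c =>
          if d.contains c then [(d.getD c (c,c)).1, (d.getD c (c,c)).2] else [c]))).map
          String.ofList := by
  rw [PySem.List.pyRange_zero_nat, List.map_map]
  rw [show ((fun mask => pvDecode d w mask) ∘ fun k : Nat => (k : Int))
      = fun i : Nat => String.ofList ((pvGN d w.reverse i).reverse) from
    funext (fun i => pvDecode_natCast d w i)]
  rw [show (fun i : Nat => String.ofList ((pvGN d w.reverse i).reverse))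
      = String.ofList ∘ (fun i : Nat => (pvGN d w.reverse i).reverse) from rfl]
  rw [← List.map_map, decode_range_eq_product]

-- ===== VERDICT (by name: the statement is the Claim_ definition above) =====
theorem generate_variants_multi_vowel_spec : Claim_equal_generate_variants_multi_vowel := by
  intro word max_variants _
  unfold Spec_generate_variants_multi_vowel
  unfold generate_variants_multi_vowel generate_variants_multi_vowel_alt generate_variants_eo_only
  simp only [PySem.List.foldl_append_singleton_eq_map, List.nil_append]
  generalize (PySem.Str.lower word).toList = w
  have hinj : Function.Injective String.ofList := fun a b h => String.ofList_inj.mp h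
  -- the snd-projection of A's positions list is the per-character alternatives
  have h1 : (List.map (fun x => x.2)
      (List.map (fun x => (x.1, if pvSubsA.contains x.2 = true then pvSubsA.getD x.2 [x.2] else [x.2]))
        (PySem.List.enumerate w))) = w.map pvSubsB := by
    rw [List.map_map]
    have : ((fun x : Int × List Char => x.2) ∘
        (fun x : Int × Char => (x.1, if pvSubsA.contains x.2 = true then pvSubsA.getD x.2 [x.2] else [x.2])))
        = fun x : Int × Char => pvSubsB x.2 := by
      funext x; exact substA_eq_pvSubsB x.2
    rw [this, show (fun x : Int × Char => pvSubsB x.2) = pvSubsB ∘ (fun x : Int × Char => x.2) from rfl,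
      ← List.map_map, PySem.List.map_snd_enumerate]
  -- A's total_combinations equals 2 ^ m
  have h2 : (List.foldl (fun t pc => t * (pc.2.length : Int)) 1
      (List.map (fun x => (x.1, if pvSubsA.contains x.2 = true then pvSubsA.getD x.2 [x.2] else [x.2]))
        (PySem.List.enumerate w)))
      = ((2 ^ (w.countP (fun c => ['e','o','a','i','y','u'].contains c)) : Nat) : Int) := by
    rw [foldl_mul_len, one_mul]
    congr 1
    rw [show (fun pc : Int × List Char => pc.2.length) = List.length ∘ (fun pc : Int × List Char => pc.2) from rfl,
      ← List.map_map, h1, List.map_map]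
    exact prod_len_eq_pow w
  -- B's m and k are A's counts
  have hm : w.countP (fun c => pvMulti.contains c)
      = w.countP (fun c => ['e','o','a','i','y','u'].contains c) :=
    List.countP_congr (fun c _ => by rw [multi_contains_eq c])
  have hk : w.countP (fun c => pvEo.contains c) = w.countP (fun c => ['e','o'].contains c) :=
    List.countP_congr (fun c _ => by rw [eo_contains_eq c])
  rw [h2, hm, hk, filter_enumerate_eq_pvEposFrom, length_pvEposFrom, h1]
  -- B's two decode lists, rewritten to product form
  have hBmulti := decode_map_range pvMulti w
  rw [hm, List.map_congr_left (fun c (_ : c ∈ w) => multi_group_eq c)] at hBmulti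
  have hBeo := decode_map_range pvEo w
  rw [hk, List.map_congr_left (fun c (_ : c ∈ w) => eo_group_eq c)] at hBeo
  by_cases hc : max_variants < ((2 ^ (w.countP (fun c => ['e','o','a','i','y','u'].contains c)) : Nat) : Int)
  · rw [if_pos hc, if_neg (not_le.mpr hc)]
    by_cases h5 : 5 < w.countP (fun c => ['e','o'].contains c)
    · rw [if_pos h5, if_pos h5]
    · rw [if_neg h5, if_neg h5]
      -- A's fallback set-loop and B's collect-loop take the same prefix of the same list
      have hb := eo_build_eq w []
      simp only [List.length_nil, Nat.cast_zero, List.nil_append] at hb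
      simp only [List.map_id'] at hb
      have hgrp : ∀ cs ∈ (w.map (fun c => if ['e','o'].contains c then ['e','o'] else [c])), cs.Nodup := by
        intro cs hcs
        simp only [List.mem_map] at hcs
        obtain ⟨c, _, rfl⟩ := hcs
        split <;> simp
      have hmap : (pvProduct (List.replicate (w.countP (fun c => ['e','o'].contains c)) ['e','o'])).map
            (fun combo => String.ofList
              (List.foldl (fun v pc => PySem.List.pySetD v pc.1.1 pc.2) w ((pvEposFrom 0 w).zip combo)))
          = List.map String.ofList
              (pvProduct (w.map (fun c => if ['e','o'].contains c then ['e','o'] else [c]))) := by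
        rw [show (fun combo => String.ofList
              (List.foldl (fun v pc => PySem.List.pySetD v pc.1.1 pc.2) w ((pvEposFrom 0 w).zip combo)))
            = String.ofList ∘ (fun combo =>
              List.foldl (fun v pc => PySem.List.pySetD v pc.1.1 pc.2) w ((pvEposFrom 0 w).zip combo)) from rfl,
          ← List.map_map, hb]
      rw [pvAddLoop_take max_variants _ _ PySem.Set.empty
          (by rw [hmap]; exact ((nodup_pvProduct _ hgrp).map hinj))
          (by intro x _ hx; simp [PySem.Set.empty] at hx)]
      rw [hmap, pvCollect_take, hBeo]
      simp [PySem.Set.empty]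
  · rw [if_neg hc, if_pos (not_lt.mp hc)]
    have hgrp : ∀ cs ∈ w.map pvSubsB, cs.Nodup := by
      intro cs hcs
      simp only [List.mem_map] at hcs
      obtain ⟨c, _, rfl⟩ := hcs
      exact pvSubsB_nodup c
    have hnd : ((pvProduct (w.map pvSubsB)).map String.ofList).Nodup :=
      (nodup_pvProduct _ hgrp).map hinj
    have hlen : ((pvProduct (w.map pvSubsB)).map String.ofList).length
        = 2 ^ (w.countP (fun c => ['e','o','a','i','y','u'].contains c)) := by
      rw [List.length_map, length_pvProduct, List.map_map]
      exact prod_len_eq_pow w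
    rw [pvAddLoop_take max_variants _ _ PySem.Set.empty
        (by simpa using hnd)
        (by intro x _ hx; simp [PySem.Set.empty] at hx)]
    simp only [PySem.Set.empty, List.nil_append, List.length_nil, Nat.cast_zero, sub_zero]
    have hge : ¬ max_variants < 1 := by
      push Not at hc ⊢
      calc (1:Int) ≤ ((2 ^ (w.countP (fun c => ['e','o','a','i','y','u'].contains c)) : Nat) : Int) := by
            exact_mod_cast Nat.one_le_two_pow
        _ ≤ max_variants := hc
    rw [if_neg hge]
    rw [List.take_of_length_le (by
      push Not at hc hge
      have := hlen
      simp only [List.length_map] at this ⊢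
      omega)]
    rw [hBmulti]
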